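-- pv_equiv track=rewrite | github.com/TomaszRoksz/Cryptography | disposable_keys/cipher_message.py | chars_to_bin
-- ===== SOURCE A (Python) =====
-- def chars_to_bin(text):
--
--     ascii_numbers=[]*len(text)
--     flag=0
--
--     for i in range(len(text)):
--
--         if text[i]=='\\' and flag==0:
--
--             if text[i+1]=='x':
--                 ascii_numbers.append(int(text[i+2:i+4], 16))
--                 flag=3
--
--             #elif text[i+1]=='a':
--                 #ascii_numbers.append(7)
--                 #flag=1
--
--             #elif text[i+1]=='b':
--                 #ascii_numbers.append(8)
--                 #flag=1
--
--             elif text[i+1]=='t':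
--                 ascii_numbers.append(9)
--                 flag=1
--
--             elif text[i+1]=='n':
--                 ascii_numbers.append(10)
--                 flag=1
--
--             elif text[i+1]=='v':
--                 ascii_numbers.append(11)
--                 flag=1
--
--             #elif text[i+1]=='f':
--                 #ascii_numbers.append(12)
--                 #flag=1
--
--             elif text[i+1]=='r':
--                 ascii_numbers.append(13)
--                 flag=1
--
--             elif text[i+1]=='"':
--                 ascii_numbers.append(34)
--                 flag=1
--
--             elif text[i+1]=='\'':
--                 ascii_numbers.append(39)
--                 flag=1
--
--             elif text[i+1]=='\\':
--                 ascii_numbers.append(92)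
--                 flag=1
--
--
--             else: ascii_numbers.append(int(format(ord(text[i]), 'b'), 2))
--
--         elif flag != 0:
--             flag-=1
--
--         else:
--             ascii_numbers.append(int(format(ord(text[i]), 'b'), 2))
--
--     return ascii_numbers
-- ===== SOURCE B (Python) =====
-- _ESC = {'t': 9, 'n': 10, 'v': 11, 'r': 13, '"': 34, "'": 39, '\\': 92}
--
-- def chars_to_bin(text):
--     # Chunk-based decoder: loop once per backslash occurrence (str.find), bulk-converting
--     # each plain chunk with map(ord), instead of deciding per character.
--     out = []
--     i = 0
--     while True:
--         j = text.find('\\', i)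
--         if j == -1:
--             out.extend(map(ord, text[i:]))
--             return out
--         out.extend(map(ord, text[i:j]))
--         nxt = text[j + 1]  # same IndexError as A for a trailing backslash
--         if nxt == 'x':
--             out.append(int(text[j + 2:j + 4], 16))
--             i = j + 4
--         elif nxt in _ESC:
--             out.append(_ESC[nxt])
--             i = j + 2
--         else:
--             out.append(92)
--             i = j + 1
-- ===== Notes on version B (the rewrite author's own statement) =====
-- stated objective: faster
-- what changed: Replaced A's per-character loop with a decrementing skip-flag and an elif chain by a chunk decoder: the loop runs once per backslash occurrence located with str.find, bulk-converts the whole plain chunk with out.extend(map(ord, ...)), and decodes the escape via a dict (4 chars for \x, 2 for a known escape, 1 otherwise).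
import Mathlib
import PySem

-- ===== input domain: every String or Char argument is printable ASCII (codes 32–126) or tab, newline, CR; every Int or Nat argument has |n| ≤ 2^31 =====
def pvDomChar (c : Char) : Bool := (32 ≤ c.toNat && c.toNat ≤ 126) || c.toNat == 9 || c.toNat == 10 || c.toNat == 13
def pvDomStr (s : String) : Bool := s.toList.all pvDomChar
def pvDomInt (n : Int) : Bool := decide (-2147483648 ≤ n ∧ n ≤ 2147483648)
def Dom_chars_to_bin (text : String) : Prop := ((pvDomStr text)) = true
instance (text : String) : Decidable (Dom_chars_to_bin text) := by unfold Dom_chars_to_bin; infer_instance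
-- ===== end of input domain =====

-- B replaces A's per-character skip-flag state machine by a chunk decoder: it loops once per
-- backslash occurrence (str.find) and bulk-converts each plain chunk with map(ord).

-- ===== PORT A =====
-- One iteration of A's `for i in range(len(text))` loop; state = (ascii_numbers, flag),
-- `none` = the Python raised (IndexError on text[i+1] / ValueError from int(·,16)).
-- text[i] is read with getD: i ∈ range(len(text)) is always in range, so this is exact.
-- text[i+2:i+4] = (cs.drop (i+2)).take 2 exactly (non-negative in-order clamped slice);
-- int(s, 16) is PySem.Int.ofCharsBase?; int(format(ord(c),'b'),2) = ord(c) = c.toNat.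
def chA_step (cs : List Char) (st : Option (List Int × Int)) (i : Nat) : Option (List Int × Int) :=
  match st with
  | none => none
  | some (acc, flag) =>
    let c := cs.getD i ' '
    if c = '\\' ∧ flag = 0 then
      match cs[i+1]? with
      | none => none                      -- IndexError
      | some nxt =>
        if nxt = 'x' then
          match PySem.Int.ofCharsBase? ((cs.drop (i+2)).take 2) 16 with
          | none => none                  -- ValueError
          | some v => some (acc ++ [v], 3)
        else if nxt = 't' then some (acc ++ [(9:Int)], 1)
        else if nxt = 'n' then some (acc ++ [(10:Int)], 1)
        else if nxt = 'v' then some (acc ++ [(11:Int)], 1)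
        else if nxt = 'r' then some (acc ++ [(13:Int)], 1)
        else if nxt = '"' then some (acc ++ [(34:Int)], 1)
        else if nxt = '\'' then some (acc ++ [(39:Int)], 1)
        else if nxt = '\\' then some (acc ++ [(92:Int)], 1)
        else some (acc ++ [(c.toNat : Int)], flag)
    else if flag ≠ 0 then some (acc, flag - 1)
    else some (acc ++ [(c.toNat : Int)], flag)

def chars_to_bin (text : String) : List Int :=
  let cs := text.toList
  match (List.range cs.length).foldl (chA_step cs) (some ([], (0:Int))) with
  | some (acc, _) => acc
  | none => []                            -- unreachable under Pre_ (the Python raises there)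

-- ===== PORT B =====
-- the _ESC dict of Source B
def escDict : List (Char × Int) :=
  [('t', 9), ('n', 10), ('v', 11), ('r', 13), ('"', 34), ('\'', 39), ('\\', 92)]

-- Source B's `while True` loop over backslash occurrences; `none` = the Python raised.
-- `text.find('\\', i)` (i always 0 ≤ i; result absolute index j or -1) is ported exactly as
-- `(cs.drop i).findIdx? (· = '\\')` giving the offset d (j = i + d), none = -1;
-- `out.extend(map(ord, text[i:j]))` is appending the mapped chunk `(cs.drop i).take d`.
def chB_go (cs : List Char) (i : Nat) (acc : List Int) : Option (List Int) :=
  match h : (cs.drop i).findIdx? (· = '\\') with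
  | none => some (acc ++ ((cs.drop i).map (fun c => (c.toNat : Int))))
  | some d =>
    let j := i + d
    let acc2 := acc ++ (((cs.drop i).take d).map (fun c => (c.toNat : Int)))
    match cs[j+1]? with
    | none => none                        -- IndexError
    | some nxt =>
      if nxt = 'x' then
        match PySem.Int.ofCharsBase? ((cs.drop (j+2)).take 2) 16 with
        | none => none                    -- ValueError
        | some v => chB_go cs (j+4) (acc2 ++ [v])
      else
        match escDict.lookup nxt with     -- `nxt in _ESC` + `_ESC[nxt]` (distinct literal keys)
        | some code => chB_go cs (j+2) (acc2 ++ [code])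
        | none => chB_go cs (j+1) (acc2 ++ [(92:Int)])
termination_by cs.length - i
decreasing_by
  all_goals
    have hd := List.findIdx?_eq_some_iff_findIdx_eq.mp h
    simp only [List.length_drop] at hd
    omega

def chars_to_bin_alt (text : String) : List Int :=
  (chB_go text.toList 0 []).getD []

-- ===== PRECONDITION & SPEC =====
-- Well-formedness grammar of the escape text (a reader checks it token by token without
-- running either program): a live backslash must be followed by some character, and a live
-- "\x" by a field that int(·,16) accepts.
def okEsc : List Char → Bool
  | [] => true
  | [c] => c != '\\'
  | c :: n :: rest =>
    if c = '\\' then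
      if n = 'x' then
        match rest with
        | [] => false
        | [a] => (PySem.Int.ofCharsBase? [a] 16).isSome
        | a :: b :: rest2 => (PySem.Int.ofCharsBase? [a, b] 16).isSome && okEsc rest2
      else if n = 't' ∨ n = 'n' ∨ n = 'v' ∨ n = 'r' ∨ n = '"' ∨ n = '\'' ∨ n = '\\' then okEsc rest
      else okEsc (n :: rest)
    else okEsc (n :: rest)

-- Pre_ excludes exactly the inputs on which the Python A raises: a trailing live backslash
-- (IndexError on text[i+1]) or a live "\x" whose 2-char field int(·,16) rejects (ValueError).
def Pre_chars_to_bin (text : String) : Prop := okEsc text.toList = true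
instance (text : String) : Decidable (Pre_chars_to_bin text) := by unfold Pre_chars_to_bin; infer_instance

def pvWitness_chars_to_bin : String := "ab\\n"

def Spec_chars_to_bin (text : String) (out : List Int) : Prop := out = chars_to_bin_alt text
instance (text : String) (out : List Int) : Decidable (Spec_chars_to_bin text out) := by unfold Spec_chars_to_bin; infer_instance

-- ===== CLAIM (what is proved, stated in full; the proofs are below) =====
def Claim_equal_chars_to_bin : Prop := ∀ (text : String), Dom_chars_to_bin text → Pre_chars_to_bin text → Spec_chars_to_bin text (chars_to_bin text)

-- ===== LEMMAS AND PROOFS =====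

-- A's loop body when the skip flag is set: it only decrements the flag.
lemma chA_step_skip (cs : List Char) (acc : List Int) (f : Int) (i : Nat) (hf : f ≠ 0) :
    chA_step cs (some (acc, f)) i = some (acc, f - 1) := by
  simp [chA_step, hf]

-- Unfolding chB_go when the current chunk runs to the end of the text.
lemma chB_go_none (cs : List Char) (i : Nat) (acc : List Int)
    (hfi : (cs.drop i).findIdx? (fun c => decide (c = '\\')) = none) :
    chB_go cs i acc = some (acc ++ ((cs.drop i).map (fun c => (c.toNat : Int)))) := by
  rw [chB_go.eq_def]
  split
  · rfl
  · rename_i d h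
    rw [hfi] at h
    cases h

-- Unfolding chB_go when the next backslash is at offset d of the current chunk.
lemma chB_go_some (cs : List Char) (i : Nat) (acc : List Int) (d : Nat)
    (hfi : (cs.drop i).findIdx? (fun c => decide (c = '\\')) = some d) :
    chB_go cs i acc =
      match cs[i+d+1]? with
      | none => none
      | some nxt =>
        if nxt = 'x' then
          match PySem.Int.ofCharsBase? ((cs.drop (i+d+2)).take 2) 16 with
          | none => none
          | some v => chB_go cs (i+d+4) ((acc ++ ((cs.drop i).take d).map (fun c => (c.toNat : Int))) ++ [v])
        else
          match escDict.lookup nxt with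
          | some code => chB_go cs (i+d+2) ((acc ++ ((cs.drop i).take d).map (fun c => (c.toNat : Int))) ++ [code])
          | none => chB_go cs (i+d+1) ((acc ++ ((cs.drop i).take d).map (fun c => (c.toNat : Int))) ++ [(92:Int)]) := by
  rw [chB_go.eq_def]
  split
  · rename_i h
    rw [hfi] at h
    cases h
  · rename_i d' h
    rw [hfi] at h
    injection h with h
    subst h
    rfl

-- Peeling one plain character off the current chunk of B's scan.
lemma chB_peel (cs : List Char) (i : Nat) (acc : List Int) (hi : i < cs.length)
    (hc : cs[i] ≠ '\\') :
    chB_go cs i acc = chB_go cs (i+1) (acc ++ [(cs[i].toNat : Int)]) := by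
  have hdrop : cs.drop i = cs[i] :: cs.drop (i+1) := List.drop_eq_getElem_cons hi
  have hcd : (decide (cs[i] = '\\')) = false := decide_eq_false hc
  cases hfi : (cs.drop (i+1)).findIdx? (fun c => decide (c = '\\')) with
  | none =>
    have h1 : (cs.drop i).findIdx? (fun c => decide (c = '\\')) = none := by
      rw [hdrop, List.findIdx?_cons, hcd]
      simp [hfi]
    rw [chB_go_none _ _ _ h1, chB_go_none _ _ _ hfi, hdrop]
    simp only [List.map_cons, List.append_assoc, List.singleton_append]
  | some d =>
    have h1 : (cs.drop i).findIdx? (fun c => decide (c = '\\')) = some (d+1) := by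
      rw [hdrop, List.findIdx?_cons, hcd]
      simp [hfi]
    rw [chB_go_some _ _ _ _ h1, chB_go_some _ _ _ _ hfi]
    have hj1 : i + (d+1) + 1 = (i+1) + d + 1 := by omega
    have hj2 : i + (d+1) + 2 = (i+1) + d + 2 := by omega
    have hj4 : i + (d+1) + 4 = (i+1) + d + 4 := by omega
    have hch : (acc ++ ((cs.drop i).take (d+1)).map (fun c => (c.toNat : Int)))
        = (acc ++ [(cs[i].toNat : Int)]) ++ ((cs.drop (i+1)).take d).map (fun c => (c.toNat : Int)) := by
      rw [hdrop]
      simp only [List.take_succ_cons, List.map_cons, List.append_assoc, List.singleton_append]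
    rw [hj1, hj2, hj4, hch]

-- Main loop correspondence: running A's remaining iterations (positions i … len-1) with
-- flag 0 computes exactly B's chunk scan from cursor i, provided the suffix is well formed.
lemma runA (cs : List Char) : ∀ (k i : Nat) (acc : List Int), i + k = cs.length →
    okEsc (cs.drop i) = true →
    Option.map Prod.fst ((List.range' i k).foldl (chA_step cs) (some (acc, (0:Int))))
      = chB_go cs i acc := by
  intro k
  induction k using Nat.strong_induction_on with
  | _ k IH =>
    intro i acc hlen hok
    rcases k with _ | m
    · have hnil : cs.drop i = [] := List.drop_eq_nil_iff.mpr (by omega)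
      rw [chB_go_none _ _ _ (by rw [hnil]; rfl), hnil]
      simp
    · have hi : i < cs.length := by omega
      have hdrop : cs.drop i = cs[i] :: cs.drop (i+1) := List.drop_eq_getElem_cons hi
      rw [List.range'_succ, List.foldl_cons]
      by_cases hc : cs[i] = '\\'
      · -- a live backslash: B's find hits position i, the chunk is empty
        have hne : cs.drop (i+1) ≠ [] := by
          intro hnil
          rw [hdrop, hnil] at hok
          simp [okEsc, hc] at hok
        have hi1 : i + 1 < cs.length := by
          by_contra hcon
          exact hne (List.drop_eq_nil_iff.mpr (by omega))
        have hdrop1 : cs.drop (i+1) = cs[i+1] :: cs.drop (i+2) := List.drop_eq_getElem_cons hi1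
        have hget1 : cs[i+1]? = some cs[i+1] := List.getElem?_eq_getElem hi1
        have h1 : (cs.drop i).findIdx? (fun c => decide (c = '\\')) = some 0 := by
          rw [hdrop, List.findIdx?_cons]
          simp [hc]
        have hB := chB_go_some cs i acc 0 h1
        simp only [Nat.add_zero, List.take_zero, List.map_nil, List.append_nil] at hB
        rw [hdrop, hdrop1, okEsc.eq_def] at hok
        simp only [hc, if_true] at hok
        by_cases hx : cs[i+1] = 'x'
        · -- \x escape: consume 4
          simp only [hx, if_true] at hok
          rcases hr : cs.drop (i+2) with _ | ⟨a, _ | ⟨b, rest2⟩⟩ <;> rw [hr] at hok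
          · simp at hok
          · -- the hex field is the single last character: the flag never returns to 0
            obtain ⟨v, hv⟩ := Option.isSome_iff_exists.mp (by simpa using hok)
            have hlen2 : cs.length = i + 3 := by
              have := congrArg List.length hr
              simp at this
              omega
            have hm : m = 2 := by omega
            subst hm
            have hstep : chA_step cs (some (acc, (0:Int))) i = some (acc ++ [v], 3) := by
              simp [chA_step, List.getD_eq_getElem?_getD, List.getElem?_eq_getElem hi, hc,
                hget1, hx, hr, hv]
            rw [hstep, show List.range' (i+1) 2 = [i+1, i+2] from rfl]
            simp only [List.foldl_cons, List.foldl_nil]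
            rw [chA_step_skip cs _ 3 _ (by norm_num), chA_step_skip cs _ (3-1) _ (by norm_num)]
            rw [hB]
            simp only [hget1, hx, if_true, hr, show List.take 2 [a] = [a] from rfl]
            rw [hv]
            have hnil : cs.drop (i+4) = [] := List.drop_eq_nil_iff.mpr (by omega)
            have hBnil := chB_go_none cs (i+4) (acc ++ [v]) (by rw [hnil]; rfl)
            simp [hBnil, hnil]
          · -- a full 2-character hex field: consume 4
            obtain ⟨hv', hok4'⟩ := Bool.and_eq_true_iff.mp hok
            obtain ⟨v, hv⟩ := Option.isSome_iff_exists.mp hv'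
            have hr4 : cs.drop (i+4) = rest2 := by
              have hdd : cs.drop (i+4) = (cs.drop (i+2)).drop 2 := by
                rw [List.drop_drop]
              rw [hdd, hr]
              rfl
            have hok4 : okEsc (cs.drop (i+4)) = true := by rw [hr4]; exact hok4'
            have hm : 3 ≤ m := by
              have := congrArg List.length hr
              simp at this
              omega
            obtain ⟨m', rfl⟩ : ∃ m', m = m' + 3 := ⟨m - 3, by omega⟩
            have hstep : chA_step cs (some (acc, (0:Int))) i = some (acc ++ [v], 3) := by
              simp [chA_step, List.getD_eq_getElem?_getD, List.getElem?_eq_getElem hi, hc,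
                hget1, hx, hr, hv]
            have hsplit : List.range' (i+1) (m'+3) = [i+1, i+2, i+3] ++ List.range' (i+4) m' := by
              rw [List.range'_succ, List.range'_succ, List.range'_succ]
              rfl
            rw [hstep, hsplit, List.foldl_append]
            simp only [List.foldl_cons, List.foldl_nil]
            rw [chA_step_skip cs _ 3 _ (by norm_num), chA_step_skip cs _ (3-1) _ (by norm_num),
              chA_step_skip cs _ (3-1-1) _ (by norm_num)]
            rw [show ((3:Int)-1-1-1) = 0 by norm_num]
            rw [IH m' (by omega) (i+4) (acc ++ [v]) (by omega) hok4]
            rw [hB]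
            simp [hget1, hx, hr, hv]
        · by_cases hesc : cs[i+1] = 't' ∨ cs[i+1] = 'n' ∨ cs[i+1] = 'v' ∨ cs[i+1] = 'r' ∨
              cs[i+1] = '"' ∨ cs[i+1] = '\'' ∨ cs[i+1] = '\\'
          · -- known two-char escape: consume 2
            simp only [hx, if_false, hesc, if_true] at hok
            have hm1 : 1 ≤ m := by omega
            have hsplit : List.range' (i+1) m = (i+1) :: List.range' (i+2) (m-1) := by
              rw [show m = (m-1)+1 by omega, List.range'_succ]
              rw [show i+1+1 = i+2 by omega, show m-1+1-1 = m-1 by omega]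
            have hcode : ∃ code : Int, chA_step cs (some (acc, (0:Int))) i = some (acc ++ [code], 1) ∧
                List.lookup cs[i+1] escDict = some code := by
              rcases hesc with h | h | h | h | h | h | h
              · exact ⟨9, by simp [chA_step, List.getD_eq_getElem?_getD, List.getElem?_eq_getElem hi, hc, hget1, h], by rw [h]; decide⟩
              · exact ⟨10, by simp [chA_step, List.getD_eq_getElem?_getD, List.getElem?_eq_getElem hi, hc, hget1, h], by rw [h]; decide⟩
              · exact ⟨11, by simp [chA_step, List.getD_eq_getElem?_getD, List.getElem?_eq_getElem hi, hc, hget1, h], by rw [h]; decide⟩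
              · exact ⟨13, by simp [chA_step, List.getD_eq_getElem?_getD, List.getElem?_eq_getElem hi, hc, hget1, h], by rw [h]; decide⟩
              · exact ⟨34, by simp [chA_step, List.getD_eq_getElem?_getD, List.getElem?_eq_getElem hi, hc, hget1, h], by rw [h]; decide⟩
              · exact ⟨39, by simp [chA_step, List.getD_eq_getElem?_getD, List.getElem?_eq_getElem hi, hc, hget1, h], by rw [h]; decide⟩
              · exact ⟨92, by simp [chA_step, List.getD_eq_getElem?_getD, List.getElem?_eq_getElem hi, hc, hget1, h], by rw [h]; decide⟩
            obtain ⟨code, hstep, hlk⟩ := hcode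
            rw [hstep, hsplit, List.foldl_cons, chA_step_skip cs _ 1 _ (by norm_num)]
            rw [show ((1:Int)-1) = 0 by norm_num]
            rw [IH (m-1) (by omega) (i+2) _ (by omega) hok]
            rw [hB]
            simp [hget1, hx, hlk]
          · -- unknown escape: append ord('\\') = 92, consume 1
            simp only [hx, if_false, hesc, if_false] at hok
            have hok1 : okEsc (cs.drop (i+1)) = true := by rw [hdrop1]; exact hok
            have hstep : chA_step cs (some (acc, (0:Int))) i =
                some (acc ++ [((92:Nat) : Int)], 0) := by
              have h92 : ('\\' : Char).toNat = 92 := by decide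
              simp [chA_step, List.getD_eq_getElem?_getD, List.getElem?_eq_getElem hi, hc,
                hget1, hx, h92]
              push Not at hesc
              simp [hesc]
            rw [hstep, IH m (by omega) (i+1) _ (by omega) hok1]
            rw [hB]
            push Not at hesc
            obtain ⟨h1, h2, h3, h4, h5, h6, h7⟩ := hesc
            have hb : ∀ c : Char, cs[i+1] ≠ c → (cs[i+1] == c) = false := fun c hc' => beq_eq_false_iff_ne.mpr hc'
            simp [hget1, hx, escDict, List.lookup, hb _ h1, hb _ h2, hb _ h3, hb _ h4,
              hb _ h5, hb _ h6, hb _ h7]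
      · -- ordinary character: consume 1 on the A side, peel it off B's chunk
        have hok1 : okEsc (cs.drop (i+1)) = true := by
          rcases hr : cs.drop (i+1) with _ | ⟨n, rest⟩
          · simp [okEsc]
          · rw [hdrop, hr, okEsc.eq_def] at hok
            simp only [hc, if_false] at hok
            simpa [hc] using hok
        have hstep : chA_step cs (some (acc, (0:Int))) i =
            some (acc ++ [(cs[i].toNat : Int)], 0) := by
          simp [chA_step, List.getD_eq_getElem?_getD, List.getElem?_eq_getElem hi, hc]
        rw [hstep, IH m (by omega) (i+1) _ (by omega) hok1]
        exact (chB_peel cs i acc hi hc).symm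

-- ===== VERDICT (by name: the statement is the Claim_ definition above) =====
theorem chars_to_bin_spec : Claim_equal_chars_to_bin := by
  intro text hdom hpre
  unfold Spec_chars_to_bin chars_to_bin chars_to_bin_alt
  have h := runA text.toList text.toList.length 0 [] (by omega) (by simpa using hpre)
  simp only [List.range_eq_range']
  rw [← h]
  cases (List.range' 0 text.toList.length).foldl (chA_step text.toList) (some ([], (0:Int))) with
  | none => rfl
  | some p => cases p; rfl
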